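-- pv_equiv track=rewrite | github.com/Lihong062/CS101 | APTs/Final APT/CloseTogether.py | compute
-- ===== SOURCE A (Python) =====
-- def compute(phrase):
--     '''
--     phrase is a string of words
--
--     Returns in sorted order, a String
--     of the unique words from phrase that
--     that have the smallest "closeness"
--     '''
--
--     phrase = phrase.split()
--     alpha = 'abcdefghijklmnopqrstuvwxyz'
--     closeness = []
--     ret = []
--
--     for word in phrase:
--         distance = []
--         for char1 in word:
--             for char2 in word:
--                 dist = abs(alpha.index(char1)-alpha.index(char2))
--                 distance.append(dist)
--         closeness.append(max(distance))
--
--     for i in range(len(closeness)):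
--         if closeness[i] == (min(closeness)):
--             ret.append(phrase[i])
--
--     return ' '.join(sorted(set(ret)))
-- ===== SOURCE B (Python) =====
-- def compute(phrase):
--     '''
--     phrase is a string of words
--
--     Returns in sorted order, a String
--     of the unique words from phrase that
--     that have the smallest "closeness"
--     '''
--     alpha = 'abcdefghijklmnopqrstuvwxyz'
--     best = None
--     winners = []
--     for word in phrase.split():
--         idxs = [alpha.index(c) for c in word]
--         close = max(idxs) - min(idxs)
--         if best is None or close < best:
--             best = close
--             winners = [word]
--         elif close == best:
--             winners.append(word)
--     return ' '.join(sorted(set(winners)))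
-- ===== Notes on version B (the rewrite author's own statement) =====
-- stated objective: faster
-- what changed: One pass keeping a running minimum closeness and its winner list, with each word's closeness computed as max minus min of its letter indices, replaces A's per-word quadratic pairwise-distance list and second index loop that recomputes min(closeness) on every iteration.
import Mathlib
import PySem

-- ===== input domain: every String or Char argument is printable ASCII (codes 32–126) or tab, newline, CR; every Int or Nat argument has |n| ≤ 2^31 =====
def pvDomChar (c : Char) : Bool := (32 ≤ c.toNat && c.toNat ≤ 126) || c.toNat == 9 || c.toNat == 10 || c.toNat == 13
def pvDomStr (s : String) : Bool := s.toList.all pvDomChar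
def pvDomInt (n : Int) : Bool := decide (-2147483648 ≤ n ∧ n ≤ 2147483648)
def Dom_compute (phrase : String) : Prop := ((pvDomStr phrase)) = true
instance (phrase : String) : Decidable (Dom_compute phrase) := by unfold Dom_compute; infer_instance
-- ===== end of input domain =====

-- B replaces A's per-word pairwise-distance list and second min-scanning index loop by a
-- single pass keeping the running minimum closeness (max − min of letter indices) and its winners (faster).

-- ===== PORT A =====
def alphaC : List Char := "abcdefghijklmnopqrstuvwxyz".toList

-- alpha.index(c); none = ValueError, excluded by Pre_compute (default value never reached inside Pre_)
def idxA (c : Char) : Int := ((PySem.List.index? alphaC c).getD 0 : Nat)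

def compute (phrase : String) : String :=
  let words := PySem.Chars.split₀ phrase.toList
  let closeness : List Int := words.foldl (fun acc word =>
    let distance : List Int := word.foldl (fun d c1 =>
      word.foldl (fun d2 c2 => d2 ++ [|idxA c1 - idxA c2|]) d) []
    -- max(distance): distance is nonempty (split words are nonempty), so getD 0 is never reached
    acc ++ [(PySem.List.max? distance (fun x => x)).getD 0]) []
  let ret : List (List Char) := (PySem.List.pyRange 0 (closeness.length : Int) 1).foldl
    (fun r i =>
      if PySem.List.pyGetD closeness i 0 = (PySem.List.min? closeness (fun x => x)).getD 0
      then r ++ [PySem.List.pyGetD words i []] else r) []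
  String.ofList (PySem.Chars.join [' '] (PySem.List.sorted (PySem.Set.ofList ret) (fun x => x) false))

-- ===== PORT B =====
def closeB (word : List Char) : Int :=
  let idxs := word.map idxA
  (PySem.List.max? idxs (fun x => x)).getD 0 - (PySem.List.min? idxs (fun x => x)).getD 0

def stepB (st : Option Int × List (List Char)) (word : List Char) :
    Option Int × List (List Char) :=
  let close := closeB word
  match st.1 with
  | none => (some close, [word])
  | some b =>
      if close < b then (some close, [word])
      else if close = b then (some b, st.2 ++ [word])
      else st

def compute_alt (phrase : String) : String :=
  let st := (PySem.Chars.split₀ phrase.toList).foldl stepB (none, [])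
  String.ofList (PySem.Chars.join [' '] (PySem.List.sorted (PySem.Set.ofList st.2) (fun x => x) false))

-- ===== PRECONDITION & SPEC =====
-- Pre_ excludes exactly the inputs on which A raises ValueError: a character (inside Dom) that is
-- neither a lowercase letter nor whitespace makes alpha.index fail.
def preChar (c : Char) : Bool :=
  ('a' ≤ c && c ≤ 'z') || c == ' ' || c == '\t' || c == '\n' || c == '\r'
def Pre_compute (phrase : String) : Prop := phrase.toList.all preChar = true
instance (phrase : String) : Decidable (Pre_compute phrase) := by unfold Pre_compute; infer_instance

def pvWitness_compute : String := "ab"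

def Spec_compute (phrase : String) (out : String) : Prop := out = compute_alt phrase
instance (phrase : String) (out : String) : Decidable (Spec_compute phrase out) := by
  unfold Spec_compute; infer_instance

-- ===== CLAIM (what is proved, stated in full; the proofs are below) =====
def Claim_equal_compute : Prop :=
  ∀ (phrase : String), Dom_compute phrase → Pre_compute phrase → Spec_compute phrase (compute phrase)

-- ===== LEMMAS AND PROOFS =====

-- A's closeness of a word: max of the pairwise index distances
def distA (w : List Char) : List Int := w.flatMap (fun c1 => w.map (fun c2 => |idxA c1 - idxA c2|))
def fA (w : List Char) : Int := (PySem.List.max? (distA w) (fun x => x)).getD 0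

theorem inner_eq_distA (w : List Char) :
    w.foldl (fun d c1 => w.foldl (fun d2 c2 => d2 ++ [|idxA c1 - idxA c2|]) d) [] = distA w := by
  have h : (fun (d : List Int) c1 => w.foldl (fun d2 c2 => d2 ++ [|idxA c1 - idxA c2|]) d)
      = (fun d c1 => d ++ w.map (fun c2 => |idxA c1 - idxA c2|)) := by
    funext d c1
    exact PySem.List.foldl_append_singleton_eq_map _ w d
  rw [h, PySem.List.foldl_append_eq_flatMap]
  simp [distA]

theorem closeness_eq_map (words : List (List Char)) :
    words.foldl (fun acc word =>
      let distance : List Int := word.foldl (fun d c1 =>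
        word.foldl (fun d2 c2 => d2 ++ [|idxA c1 - idxA c2|]) d) []
      acc ++ [(PySem.List.max? distance (fun x => x)).getD 0]) [] = words.map fA := by
  simp only [inner_eq_distA]
  exact (PySem.List.foldl_append_singleton_eq_map fA words []).trans (by simp)

-- max of all |xi − xj| equals max − min
theorem fA_eq_closeB (w : List Char) : fA w = closeB w := by
  cases w with
  | nil => rfl
  | cons c t =>
    obtain ⟨a, ha⟩ : ∃ a, PySem.List.max? ((c :: t).map idxA) (fun x => x) = some a := by
      cases h : PySem.List.max? ((c :: t).map idxA) (fun x => x) with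
      | none => simp [PySem.List.max?_eq_none_iff] at h
      | some a => exact ⟨a, rfl⟩
    obtain ⟨m, hm⟩ : ∃ m, PySem.List.min? ((c :: t).map idxA) (fun x => x) = some m := by
      cases h : PySem.List.min? ((c :: t).map idxA) (fun x => x) with
      | none => simp [PySem.List.min?_eq_none_iff] at h
      | some m => exact ⟨m, rfl⟩
    have haMax := PySem.List.max?_isMax ha
    have hmMin := PySem.List.min?_isMin hm
    obtain ⟨ca, hca, hcaEq⟩ := List.mem_map.mp (PySem.List.max?_mem ha)
    obtain ⟨cm, hcm, hcmEq⟩ := List.mem_map.mp (PySem.List.min?_mem hm)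
    have hma : m ≤ a := hmMin a (PySem.List.max?_mem ha)
    have hkey : |idxA ca - idxA cm| ∈ distA (c :: t) := by
      simp only [distA, List.mem_flatMap, List.mem_map]
      exact ⟨ca, hca, cm, hcm, rfl⟩
    obtain ⟨v, hv⟩ : ∃ v, PySem.List.max? (distA (c :: t)) (fun x => x) = some v := by
      cases h : PySem.List.max? (distA (c :: t)) (fun x => x) with
      | none =>
        rw [PySem.List.max?_eq_none_iff] at h
        rw [h] at hkey
        simp at hkey
      | some v => exact ⟨v, rfl⟩
    have hvMax := PySem.List.max?_isMax hv
    have hvMem := PySem.List.max?_mem hv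
    have habs : |idxA ca - idxA cm| = a - m := by
      rw [hcaEq, hcmEq]
      exact abs_of_nonneg (by omega)
    have h1 : a - m ≤ v := habs ▸ hvMax _ hkey
    have h2 : v ≤ a - m := by
      simp only [distA, List.mem_flatMap, List.mem_map] at hvMem
      obtain ⟨c1, hc1, c2, hc2, hveq⟩ := hvMem
      have hb1 : m ≤ idxA c1 ∧ idxA c1 ≤ a :=
        ⟨hmMin _ (List.mem_map_of_mem hc1), haMax _ (List.mem_map_of_mem hc1)⟩
      have hb2 : m ≤ idxA c2 ∧ idxA c2 ≤ a :=
        ⟨hmMin _ (List.mem_map_of_mem hc2), haMax _ (List.mem_map_of_mem hc2)⟩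
      rw [← hveq]
      rw [abs_sub_le_iff]
      omega
    have : v = a - m := le_antisymm h2 h1
    simp only [fA, closeB, hv, ha, hm, Option.getD_some, this]

-- B's loop invariant
theorem foldB_some (ws : List (List Char)) :
    ∀ (b : Int) (acc : List (List Char)),
      ws.foldl stepB (some b, acc) =
        (some ((ws.map closeB).foldl min b),
         (if (ws.map closeB).foldl min b = b then acc else []) ++
           ws.filter (fun w => decide (closeB w = (ws.map closeB).foldl min b))) := by
  induction ws with
  | nil => intro b acc; simp
  | cons w t ih =>
    intro b acc
    have hstep : ∀ (acc : List (List Char)), stepB (some b, acc) w =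
        if closeB w < b then (some (closeB w), [w])
        else if closeB w = b then (some b, acc ++ [w]) else (some b, acc) := by
      intro acc; rfl
    simp only [List.foldl_cons, List.map_cons, hstep]
    by_cases h1 : closeB w < b
    · rw [if_pos h1, ih]
      have hmin : min b (closeB w) = closeB w := min_eq_right (le_of_lt h1)
      simp only [hmin]
      have hM := PySem.List.foldl_min_le (t.map closeB) (closeB w)
      rw [if_neg (by omega : ¬ (t.map closeB).foldl min (closeB w) = b)]
      rw [List.filter_cons]
      by_cases h2 : closeB w = (t.map closeB).foldl min (closeB w)
      · simp [← h2]
      · simp [h2, Ne.symm h2]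
    · rw [if_neg h1]
      by_cases h2 : closeB w = b
      · rw [if_pos h2, ih]
        have hmin : min b (closeB w) = b := by omega
        simp only [hmin]; rw [List.filter_cons]
        by_cases h3 : (t.map closeB).foldl min b = b
        · simp [h3, h2.trans h3.symm]
        · simp only [if_neg h3]
          have : ¬ closeB w = (t.map closeB).foldl min b := by rw [h2]; exact fun h => h3 h.symm
          simp [this]
      · rw [if_neg h2, ih]
        have hmin : min b (closeB w) = b := by omega
        have hM := PySem.List.foldl_min_le (t.map closeB) b
        simp only [hmin]; rw [List.filter_cons]
        have : ¬ closeB w = (t.map closeB).foldl min b := by omega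
        simp [this]

theorem loopA_eq_filter (ws : List (List Char)) (m : Int) :
    (PySem.List.pyRange 0 ((ws.map closeB).length : Int) 1).foldl
      (fun r i => if PySem.List.pyGetD (ws.map closeB) i 0 = m
                  then r ++ [PySem.List.pyGetD ws i []] else r) []
      = ws.filter (fun w => decide (closeB w = m)) := by
  have hbody : (fun (r : List (List Char)) (i : Int) =>
      if PySem.List.pyGetD (ws.map closeB) i 0 = m
      then r ++ [PySem.List.pyGetD ws i []] else r)
      = (fun r i => (fun acc wd => if closeB wd = m then acc ++ [wd] else acc)
          r (PySem.List.pyGetD ws i [])) := by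
    funext r i
    rw [show (0 : Int) = closeB [] from rfl, PySem.List.pyGetD_map]
  rw [hbody, List.length_map, PySem.List.foldl_pyRange_zero_pyGetD' ws [] (fun acc wd => if closeB wd = m then acc ++ [wd] else acc) []]
  rw [PySem.List.foldl_append_ite_eq_filter]
  simp

theorem filter_eq_foldB (ws : List (List Char)) :
    ws.filter (fun w => decide (closeB w =
        (PySem.List.min? (ws.map closeB) (fun x => x)).getD 0))
      = (ws.foldl stepB (none, [])).2 := by
  cases ws with
  | nil => simp
  | cons w t =>
    have h1 : (w :: t).foldl stepB (none, []) = t.foldl stepB (some (closeB w), [w]) := rfl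
    rw [h1, foldB_some t (closeB w) [w], List.map_cons, PySem.List.min?_id_cons,
      Option.getD_some, List.filter_cons]
    by_cases h2 : closeB w = (t.map closeB).foldl min (closeB w)
    · simp [← h2]
    · simp [h2, Ne.symm h2]

theorem compute_eq (phrase : String) : compute phrase = compute_alt phrase := by
  unfold compute compute_alt
  simp only [closeness_eq_map, show fA = closeB from funext fA_eq_closeB,
    loopA_eq_filter, filter_eq_foldB]

-- ===== VERDICT (by name: the statement is the Claim_ definition above) =====
theorem compute_spec : Claim_equal_compute := by
  intro phrase _ _
  unfold Spec_compute
  exact compute_eq phrase
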